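-- pv_equiv track=rewrite | github.com/maksimblak/AIVAN | src/documents/risk_analyzer.py | _dominant_level
-- ===== SOURCE A (Python) =====
-- from enum import Enum
-- from typing import Any, Awaitable, Callable, Dict, List, Optional, Tuple
--
-- class RiskLevel(Enum):
--     LOW = "low"
--     MEDIUM = "medium"
--     HIGH = "high"
--     CRITICAL = "critical"
--
-- def _dominant_level(levels: List[str]) -> Optional[str]:
--     if not levels:
--         return None
--     order = [RiskLevel.CRITICAL.value, RiskLevel.HIGH.value, RiskLevel.MEDIUM.value, RiskLevel.LOW.value]
--     for lvl in order:
--         if lvl in levels: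
--             return lvl
--     return None
-- ===== SOURCE B (Python) =====
-- def _dominant_level(levels):
--     rank = {"critical": 0, "high": 1, "medium": 2, "low": 3}
--     names = ["critical", "high", "medium", "low"]
--     best = None
--     for lvl in levels:
--         i = rank.get(lvl)
--         if i is not None and (best is None or i < best):
--             best = i
--     return None if best is None else names[best]
-- ===== Notes on version B (the rewrite author's own statement) =====
-- stated objective: alternative
-- what changed: Replaced A's four fixed-order membership scans over the input with a single left-to-right pass that keeps the minimum priority rank seen (via a rank table) and maps it back to its name at the end.
import Mathlib
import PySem

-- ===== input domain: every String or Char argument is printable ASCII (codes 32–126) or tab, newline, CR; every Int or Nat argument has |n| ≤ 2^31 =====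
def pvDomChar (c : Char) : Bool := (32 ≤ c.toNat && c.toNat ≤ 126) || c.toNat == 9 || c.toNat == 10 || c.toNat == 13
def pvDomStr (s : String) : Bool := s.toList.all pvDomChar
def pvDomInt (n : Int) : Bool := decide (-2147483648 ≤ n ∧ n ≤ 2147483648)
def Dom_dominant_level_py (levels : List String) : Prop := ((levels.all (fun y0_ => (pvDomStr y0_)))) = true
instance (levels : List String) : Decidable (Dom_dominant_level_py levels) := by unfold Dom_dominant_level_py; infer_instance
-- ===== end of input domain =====

-- B replaces A's four fixed-order membership scans with one pass keeping the minimum rank seen (alternative decomposition, same exact result).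


-- ===== PORT A =====
-- the 'for lvl in order: if lvl in levels: return lvl' loop
def dlpScanOrder (order : List String) (levels : List String) : Option String :=
  match order with
  | [] => none
  | lvl :: rest => if levels.contains lvl then some lvl else dlpScanOrder rest levels

def dominant_level_py (levels : List String) : Option String :=
  if levels = [] then none
  else dlpScanOrder ["critical", "high", "medium", "low"] levels

-- ===== PORT B =====
def dlpRank : PySem.Dict String Int :=
  PySem.Dict.ofList [("critical", 0), ("high", 1), ("medium", 2), ("low", 3)]

def dlpNames : List String := ["critical", "high", "medium", "low"]

-- one iteration of B's loop: i = rank.get(lvl); keep the smaller rank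
def dlpStep (best : Option Int) (lvl : String) : Option Int :=
  match PySem.Dict.get? dlpRank lvl with
  | none => best
  | some i =>
    match best with
    | none => some i
    | some b => if i < b then some i else best

-- 'return None if best is None else names[best]'; best is always in range 0..3 here
def dlpFinish (best : Option Int) : Option String :=
  match best with
  | none => none
  | some b => PySem.List.pyGetD dlpNames b ""

def dominant_level_py_alt (levels : List String) : Option String :=
  dlpFinish (levels.foldl dlpStep none)

-- ===== PRECONDITION & SPEC =====
def Spec_dominant_level_py (levels : List String) (out : Option String) : Prop := out = dominant_level_py_alt levels
instance (levels : List String) (out : Option String) : Decidable (Spec_dominant_level_py levels out) := by unfold Spec_dominant_level_py; infer_instance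

-- ===== CLAIM (what is proved, stated in full; the proofs are below) =====
def Claim_equal_dominant_level_py : Prop := ∀ (levels : List String), Dom_dominant_level_py levels → Spec_dominant_level_py levels (dominant_level_py levels)

-- ===== LEMMAS AND PROOFS =====

-- the common characterisation: minimum rank present, as a nested if over membership
def dlpMinRank (levels : List String) : Option Int :=
  if "critical" ∈ levels then some 0
  else if "high" ∈ levels then some 1
  else if "medium" ∈ levels then some 2
  else if "low" ∈ levels then some 3
  else none

def minO : Option Int → Option Int → Option Int
  | none, y => y
  | x, none => x
  | some a, some b => some (min a b)

lemma minO_none_left (y : Option Int) : minO none y = y := by cases y <;> rfl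
lemma minO_none_right (x : Option Int) : minO x none = x := by cases x <;> rfl

lemma minO_assoc (x y z : Option Int) : minO (minO x y) z = minO x (minO y z) := by
  cases x <;> cases y <;> cases z <;> simp [minO, min_assoc]

lemma dlpStep_eq_minO (b : Option Int) (l : String) :
    dlpStep b l = minO b (PySem.Dict.get? dlpRank l) := by
  unfold dlpStep
  cases PySem.Dict.get? dlpRank l with
  | none => exact (minO_none_right b).symm
  | some i =>
      cases b with
      | none => rfl
      | some bb => simp [minO]; split_ifs <;> simp <;> omega

lemma dlpStep_none (l : String) : dlpStep none l = PySem.Dict.get? dlpRank l := by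
  rw [dlpStep_eq_minO]; exact minO_none_left _

lemma foldl_dlpStep_gen (ls : List String) (b : Option Int) :
    ls.foldl dlpStep b = minO b (ls.foldl dlpStep none) := by
  induction ls generalizing b with
  | nil => simp [List.foldl, minO_none_right]
  | cons l ls ih =>
      simp only [List.foldl]
      rw [ih (dlpStep b l), ih (dlpStep none l), dlpStep_eq_minO, dlpStep_none, minO_assoc]

lemma rank_char (l : String) : PySem.Dict.get? dlpRank l =
    if l = "critical" then some 0 else if l = "high" then some 1
    else if l = "medium" then some 2 else if l = "low" then some 3 else none := by
  have hmk : dlpRank = PySem.Dict.mk [("critical", 0), ("high", 1), ("medium", 2), ("low", 3)] := rfl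
  have hnil : (PySem.Dict.mk ([] : List (String × Int))).get? l = none := rfl
  rw [hmk]
  simp only [PySem.Dict.get?_mk_cons, beq_iff_eq]
  by_cases h0 : l = "critical" <;> by_cases h1 : l = "high" <;>
    by_cases h2 : l = "medium" <;> by_cases h3 : l = "low" <;>
    simp_all [eq_comm]

lemma dlpFold_char (levels : List String) :
    levels.foldl dlpStep none = dlpMinRank levels := by
  induction levels with
  | nil => simp [dlpMinRank]
  | cons l ls ih =>
      have hstep : (l :: ls).foldl dlpStep none
          = minO (PySem.Dict.get? dlpRank l) (ls.foldl dlpStep none) := by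
        simp only [List.foldl]
        rw [foldl_dlpStep_gen, dlpStep_none]
      rw [hstep, ih, rank_char]
      unfold dlpMinRank
      simp only [List.mem_cons]
      split_ifs <;> simp_all [minO]

theorem dominant_level_py_spec_aux (levels : List String) :
    dominant_level_py levels = dominant_level_py_alt levels := by
  unfold dominant_level_py dominant_level_py_alt
  rw [dlpFold_char]
  have f0 : dlpFinish (some 0) = some "critical" := rfl
  have f1 : dlpFinish (some 1) = some "high" := rfl
  have f2 : dlpFinish (some 2) = some "medium" := rfl
  have f3 : dlpFinish (some 3) = some "low" := rfl
  by_cases hnil : levels = []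
  · simp [hnil, dlpMinRank, dlpFinish]
  · simp only [hnil, if_false]
    unfold dlpMinRank
    split_ifs with hc hh hm hl <;>
      simp_all [dlpScanOrder, dlpFinish]

-- ===== VERDICT (by name: the statement is the Claim_ definition above) =====
theorem dominant_level_py_spec : Claim_equal_dominant_level_py := by
  intro levels _
  exact dominant_level_py_spec_aux levels
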